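-- pv_equiv track=rewrite | github.com/umarallure/fast_firebase_portal | webhook_payload_enhancer.py | map_custom_field_to_webhook
-- ===== SOURCE A (Python) =====
-- def map_custom_field_to_webhook(field_name: str, field_key: str) -> str:
--     """Map GoHighLevel custom field to webhook payload field"""
--     field_lower = f"{field_name} {field_key}".lower()
--
--     # Mapping logic based on field names/keys
--     if any(keyword in field_lower for keyword in ['birth', 'dob', 'date_of_birth']):
--         return 'date_of_birth'
--     elif 'birth_state' in field_lower or 'state_of_birth' in field_lower:
--         return 'birth_state'
--     elif 'age' in field_lower and 'coverage' not in field_lower: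
--         return 'age'
--     elif any(keyword in field_lower for keyword in ['ssn', 'social_security', 'social security']):
--         return 'social_security_number'
--     elif 'height' in field_lower:
--         return 'height'
--     elif 'weight' in field_lower:
--         return 'weight'
--     elif any(keyword in field_lower for keyword in ['doctor', 'physician']):
--         return 'doctors_name'
--     elif any(keyword in field_lower for keyword in ['tobacco', 'smoke', 'smoking']):
--         return 'tobacco_user'
--     elif any(keyword in field_lower for keyword in ['health', 'condition', 'medical']):
--         return 'health_conditions'
--     elif any(keyword in field_lower for keyword in ['medication', 'medicine', 'drug']):
--         return 'medications'
--     elif any(keyword in field_lower for keyword in ['premium', 'monthly_premium']):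
--         return 'monthly_premium'
--     elif any(keyword in field_lower for keyword in ['coverage', 'face_amount', 'face amount']):
--         return 'coverage_amount'
--     elif 'carrier' in field_lower or 'insurance' in field_lower:
--         return 'carrier'
--     elif 'draft_date' in field_lower or 'draft date' in field_lower:
--         return 'draft_date'
--     elif any(keyword in field_lower for keyword in ['beneficiary', 'beneficiaries']):
--         return 'beneficiary_information'
--     elif 'bank' in field_lower and 'name' in field_lower:
--         return 'bank_name'
--     elif any(keyword in field_lower for keyword in ['routing', 'aba']):
--         return 'routing_number'
--     elif 'account' in field_lower and 'number' in field_lower: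
--         return 'account_number'
--     elif 'future_draft' in field_lower or 'next_draft' in field_lower:
--         return 'future_draft_date'
--     elif any(keyword in field_lower for keyword in ['driver', 'license', 'dl']):
--         return 'driver_license_number'
--     elif 'existing_coverage' in field_lower or 'previous_coverage' in field_lower:
--         return 'existing_coverage_last_2_years'
--     elif 'previous_application' in field_lower or 'prior_application' in field_lower:
--         return 'previous_applications_last_2_years'
--     elif any(keyword in field_lower for keyword in ['submission', 'submit']):
--         return 'date_of_submission'
--     elif any(keyword in field_lower for keyword in ['additional', 'notes', 'comments']):
--         return 'additional_information'
--     elif any(keyword in field_lower for keyword in ['address', 'street']):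
--         return 'address'
--     elif 'city' in field_lower:
--         return 'city'
--     elif 'state' in field_lower and 'birth' not in field_lower:
--         return 'state'
--     elif any(keyword in field_lower for keyword in ['zip', 'postal']):
--         return 'postal_code'
--     else:
--         return f'custom_{field_key}' if field_key else f'custom_{field_name.lower().replace(" ", "_")}'
-- ===== SOURCE B (Python) =====
-- # Different algorithm: instead of testing ~60 keywords with `in` substring scans,
-- # B makes ONE pass over the haystack collecting every window whose length is a
-- # keyword length into a set, intersects it with the keyword set, and then answers
-- # rule-table membership questions against that precomputed `found` set.
--
-- _SPEC = [
--     ({"birth", "dob", "date_of_birth"}, set(), set(), "date_of_birth"),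
--     ({"birth_state", "state_of_birth"}, set(), set(), "birth_state"),
--     ({"age"}, set(), {"coverage"}, "age"),
--     ({"ssn", "social_security", "social security"}, set(), set(), "social_security_number"),
--     ({"height"}, set(), set(), "height"),
--     ({"weight"}, set(), set(), "weight"),
--     ({"doctor", "physician"}, set(), set(), "doctors_name"),
--     ({"tobacco", "smoke", "smoking"}, set(), set(), "tobacco_user"),
--     ({"health", "condition", "medical"}, set(), set(), "health_conditions"),
--     ({"medication", "medicine", "drug"}, set(), set(), "medications"),
--     ({"premium", "monthly_premium"}, set(), set(), "monthly_premium"),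
--     ({"coverage", "face_amount", "face amount"}, set(), set(), "coverage_amount"),
--     ({"carrier", "insurance"}, set(), set(), "carrier"),
--     ({"draft_date", "draft date"}, set(), set(), "draft_date"),
--     ({"beneficiary", "beneficiaries"}, set(), set(), "beneficiary_information"),
--     ({"bank"}, {"name"}, set(), "bank_name"),
--     ({"routing", "aba"}, set(), set(), "routing_number"),
--     ({"account"}, {"number"}, set(), "account_number"),
--     ({"future_draft", "next_draft"}, set(), set(), "future_draft_date"),
--     ({"driver", "license", "dl"}, set(), set(), "driver_license_number"),
--     ({"existing_coverage", "previous_coverage"}, set(), set(), "existing_coverage_last_2_years"),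
--     ({"previous_application", "prior_application"}, set(), set(), "previous_applications_last_2_years"),
--     ({"submission", "submit"}, set(), set(), "date_of_submission"),
--     ({"additional", "notes", "comments"}, set(), set(), "additional_information"),
--     ({"address", "street"}, set(), set(), "address"),
--     ({"city"}, set(), set(), "city"),
--     ({"state"}, set(), {"birth"}, "state"),
--     ({"zip", "postal"}, set(), set(), "postal_code"),
-- ]
--
-- _KEYSET = frozenset().union(*(trig | req | forb for trig, req, forb, _ in _SPEC))
-- _LENGTHS = sorted({len(k) for k in _KEYSET})
--
--
-- def _keywords_present(fl):
--     """All keywords occurring in fl, found by sliding windows, not per-keyword scans."""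
--     n = len(fl)
--     windows = {fl[i:i + L] for L in _LENGTHS for i in range(n - L + 1)}
--     return _KEYSET & windows
--
--
-- def map_custom_field_to_webhook(field_name: str, field_key: str) -> str:
--     """Map GoHighLevel custom field to webhook payload field"""
--     fl = f"{field_name} {field_key}".lower()
--     found = _keywords_present(fl)
--     for trig, req, forb, out in _SPEC:
--         if (trig & found) and req <= found and not (forb & found):
--             return out
--     return f'custom_{field_key}' if field_key else f'custom_{field_name.lower().replace(" ", "_")}'
-- ===== Notes on version B (the rewrite author's own statement) =====
-- stated objective: alternative
-- what changed: Instead of A's ~60 independent per-keyword substring tests in an if/elif cascade, B makes one sliding-window pass over the lowercased haystack collecting every window of a keyword length into a set, intersects it with the keyword set once, and then evaluates an ordered rule table purely by membership in that precomputed found-set.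
import Mathlib
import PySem

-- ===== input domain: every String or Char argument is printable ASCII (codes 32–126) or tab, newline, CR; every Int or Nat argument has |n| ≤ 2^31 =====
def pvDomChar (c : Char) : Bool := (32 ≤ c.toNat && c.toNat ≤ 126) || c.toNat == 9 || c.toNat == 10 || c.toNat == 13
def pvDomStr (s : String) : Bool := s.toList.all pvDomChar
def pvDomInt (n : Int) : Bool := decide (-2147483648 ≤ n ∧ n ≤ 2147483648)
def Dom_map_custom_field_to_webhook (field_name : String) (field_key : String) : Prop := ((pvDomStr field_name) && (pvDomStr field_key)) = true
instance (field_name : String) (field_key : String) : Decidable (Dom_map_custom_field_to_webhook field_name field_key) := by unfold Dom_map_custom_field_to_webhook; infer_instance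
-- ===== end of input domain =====

-- B replaces A's per-keyword substring tests with one sliding-window pass that
-- precomputes the set of occurring keywords, then consults a rule table
-- (objective: alternative algorithm; same asymptotic cost).

-- ===== PORT A =====
def map_custom_field_to_webhook (field_name : String) (field_key : String) : String :=
  let fl := PySem.Str.lower (PySem.Str.join " " [field_name, field_key])
  if (PySem.Str.isIn "birth" fl || PySem.Str.isIn "dob" fl || PySem.Str.isIn "date_of_birth" fl) then "date_of_birth"
  else
  if (PySem.Str.isIn "birth_state" fl || PySem.Str.isIn "state_of_birth" fl) then "birth_state"
  else
  if PySem.Str.isIn "age" fl && !PySem.Str.isIn "coverage" fl then "age"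
  else
  if (PySem.Str.isIn "ssn" fl || PySem.Str.isIn "social_security" fl || PySem.Str.isIn "social security" fl) then "social_security_number"
  else
  if PySem.Str.isIn "height" fl then "height"
  else
  if PySem.Str.isIn "weight" fl then "weight"
  else
  if (PySem.Str.isIn "doctor" fl || PySem.Str.isIn "physician" fl) then "doctors_name"
  else
  if (PySem.Str.isIn "tobacco" fl || PySem.Str.isIn "smoke" fl || PySem.Str.isIn "smoking" fl) then "tobacco_user"
  else
  if (PySem.Str.isIn "health" fl || PySem.Str.isIn "condition" fl || PySem.Str.isIn "medical" fl) then "health_conditions"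
  else
  if (PySem.Str.isIn "medication" fl || PySem.Str.isIn "medicine" fl || PySem.Str.isIn "drug" fl) then "medications"
  else
  if (PySem.Str.isIn "premium" fl || PySem.Str.isIn "monthly_premium" fl) then "monthly_premium"
  else
  if (PySem.Str.isIn "coverage" fl || PySem.Str.isIn "face_amount" fl || PySem.Str.isIn "face amount" fl) then "coverage_amount"
  else
  if (PySem.Str.isIn "carrier" fl || PySem.Str.isIn "insurance" fl) then "carrier"
  else
  if (PySem.Str.isIn "draft_date" fl || PySem.Str.isIn "draft date" fl) then "draft_date"
  else
  if (PySem.Str.isIn "beneficiary" fl || PySem.Str.isIn "beneficiaries" fl) then "beneficiary_information"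
  else
  if PySem.Str.isIn "bank" fl && PySem.Str.isIn "name" fl then "bank_name"
  else
  if (PySem.Str.isIn "routing" fl || PySem.Str.isIn "aba" fl) then "routing_number"
  else
  if PySem.Str.isIn "account" fl && PySem.Str.isIn "number" fl then "account_number"
  else
  if (PySem.Str.isIn "future_draft" fl || PySem.Str.isIn "next_draft" fl) then "future_draft_date"
  else
  if (PySem.Str.isIn "driver" fl || PySem.Str.isIn "license" fl || PySem.Str.isIn "dl" fl) then "driver_license_number"
  else
  if (PySem.Str.isIn "existing_coverage" fl || PySem.Str.isIn "previous_coverage" fl) then "existing_coverage_last_2_years"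
  else
  if (PySem.Str.isIn "previous_application" fl || PySem.Str.isIn "prior_application" fl) then "previous_applications_last_2_years"
  else
  if (PySem.Str.isIn "submission" fl || PySem.Str.isIn "submit" fl) then "date_of_submission"
  else
  if (PySem.Str.isIn "additional" fl || PySem.Str.isIn "notes" fl || PySem.Str.isIn "comments" fl) then "additional_information"
  else
  if (PySem.Str.isIn "address" fl || PySem.Str.isIn "street" fl) then "address"
  else
  if PySem.Str.isIn "city" fl then "city"
  else
  if PySem.Str.isIn "state" fl && !PySem.Str.isIn "birth" fl then "state"
  else
  if (PySem.Str.isIn "zip" fl || PySem.Str.isIn "postal" fl) then "postal_code"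
  else
  if field_key = "" then PySem.Str.join "" ["custom_", PySem.Str.replace (PySem.Str.lower field_name) " " "_"]
  else PySem.Str.join "" ["custom_", field_key]

-- ===== PORT B =====
-- B finds keyword occurrences by ONE sliding-window pass over the haystack
-- (collecting all windows of the keyword lengths into a set and intersecting it
-- with the keyword set), then answers rule conditions by membership in that set.
def pvKeywords : List (List Char) := [
  "birth".toList,
  "dob".toList,
  "date_of_birth".toList,
  "birth_state".toList,
  "state_of_birth".toList,
  "age".toList,
  "coverage".toList,
  "ssn".toList,
  "social_security".toList,
  "social security".toList,
  "height".toList,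
  "weight".toList,
  "doctor".toList,
  "physician".toList,
  "tobacco".toList,
  "smoke".toList,
  "smoking".toList,
  "health".toList,
  "condition".toList,
  "medical".toList,
  "medication".toList,
  "medicine".toList,
  "drug".toList,
  "premium".toList,
  "monthly_premium".toList,
  "face_amount".toList,
  "face amount".toList,
  "carrier".toList,
  "insurance".toList,
  "draft_date".toList,
  "draft date".toList,
  "beneficiary".toList,
  "beneficiaries".toList,
  "bank".toList,
  "name".toList,
  "routing".toList,
  "aba".toList,
  "account".toList,
  "number".toList,
  "future_draft".toList,
  "next_draft".toList,
  "driver".toList,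
  "license".toList,
  "dl".toList,
  "existing_coverage".toList,
  "previous_coverage".toList,
  "previous_application".toList,
  "prior_application".toList,
  "submission".toList,
  "submit".toList,
  "additional".toList,
  "notes".toList,
  "comments".toList,
  "address".toList,
  "street".toList,
  "city".toList,
  "state".toList,
  "zip".toList,
  "postal".toList]

def pvLens : List Nat := [2, 3, 4, 5, 6, 7, 8, 9, 10, 11, 12, 13, 14, 15, 17, 20]

-- {fl[i:i+L] for L in _LENGTHS for i in range(n - L + 1)}  (range is empty when L > n)
def pvWindows (cs : List Char) : PySem.Set (List Char) :=
  PySem.Set.ofList (pvLens.flatMap (fun L => (List.range (cs.length + 1 - L)).map (fun i => (cs.drop i).take L)))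

-- _KEYSET & windows : the distinct keywords that occur, in keyword order
def pvFound (cs : List Char) : List (List Char) :=
  pvKeywords.filter (fun k => (pvWindows cs).contains k)

def pvSpec : List (List (List Char) × List (List Char) × List (List Char) × String) := [
  (["birth".toList, "dob".toList, "date_of_birth".toList], [], [], "date_of_birth"),
  (["birth_state".toList, "state_of_birth".toList], [], [], "birth_state"),
  (["age".toList], [], ["coverage".toList], "age"),
  (["ssn".toList, "social_security".toList, "social security".toList], [], [], "social_security_number"),
  (["height".toList], [], [], "height"),
  (["weight".toList], [], [], "weight"),
  (["doctor".toList, "physician".toList], [], [], "doctors_name"),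
  (["tobacco".toList, "smoke".toList, "smoking".toList], [], [], "tobacco_user"),
  (["health".toList, "condition".toList, "medical".toList], [], [], "health_conditions"),
  (["medication".toList, "medicine".toList, "drug".toList], [], [], "medications"),
  (["premium".toList, "monthly_premium".toList], [], [], "monthly_premium"),
  (["coverage".toList, "face_amount".toList, "face amount".toList], [], [], "coverage_amount"),
  (["carrier".toList, "insurance".toList], [], [], "carrier"),
  (["draft_date".toList, "draft date".toList], [], [], "draft_date"),
  (["beneficiary".toList, "beneficiaries".toList], [], [], "beneficiary_information"),
  (["bank".toList], ["name".toList], [], "bank_name"),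
  (["routing".toList, "aba".toList], [], [], "routing_number"),
  (["account".toList], ["number".toList], [], "account_number"),
  (["future_draft".toList, "next_draft".toList], [], [], "future_draft_date"),
  (["driver".toList, "license".toList, "dl".toList], [], [], "driver_license_number"),
  (["existing_coverage".toList, "previous_coverage".toList], [], [], "existing_coverage_last_2_years"),
  (["previous_application".toList, "prior_application".toList], [], [], "previous_applications_last_2_years"),
  (["submission".toList, "submit".toList], [], [], "date_of_submission"),
  (["additional".toList, "notes".toList, "comments".toList], [], [], "additional_information"),
  (["address".toList, "street".toList], [], [], "address"),
  (["city".toList], [], [], "city"),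
  (["state".toList], [], ["birth".toList], "state"),
  (["zip".toList, "postal".toList], [], [], "postal_code")]

-- the rule loop: `trig & found` nonempty, `req <= found`, `forb & found` empty
def pvScan (found : List (List Char)) : List (List (List Char) × List (List Char) × List (List Char) × String) → Option String
  | [] => none
  | r :: rs =>
      if r.1.any found.contains && r.2.1.all found.contains && !(r.2.2.1.any found.contains)
      then some r.2.2.2 else pvScan found rs

def map_custom_field_to_webhook_alt (field_name : String) (field_key : String) : String :=
  let fl := PySem.Str.lower (PySem.Str.join " " [field_name, field_key])
  (pvScan (pvFound fl.toList) pvSpec).getD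
    (if field_key = "" then PySem.Str.join "" ["custom_", PySem.Str.replace (PySem.Str.lower field_name) " " "_"]
     else PySem.Str.join "" ["custom_", field_key])

-- ===== PRECONDITION & SPEC =====
def Spec_map_custom_field_to_webhook (field_name : String) (field_key : String) (out : String) : Prop := out = map_custom_field_to_webhook_alt field_name field_key
instance (field_name : String) (field_key : String) (out : String) : Decidable (Spec_map_custom_field_to_webhook field_name field_key out) := by unfold Spec_map_custom_field_to_webhook; infer_instance

-- ===== CLAIM =====
def Claim_equal_map_custom_field_to_webhook : Prop := ∀ (field_name : String) (field_key : String), Dom_map_custom_field_to_webhook field_name field_key → Spec_map_custom_field_to_webhook field_name field_key (map_custom_field_to_webhook field_name field_key)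

-- ===== LEMMAS AND PROOFS =====
-- a nonempty k of a scanned length is among the collected windows iff it is a substring
theorem pv_window_isIn (cs k : List Char) (hne : k ≠ []) (hL : k.length ∈ pvLens) :
    (pvWindows cs).contains k = PySem.Chars.isIn k cs := by
  have : k ∈ pvWindows cs ↔ PySem.Chars.isIn k cs = true := by
    rw [pvWindows, PySem.Set.mem_ofList, ← PySem.Chars.exists_prefix_drop_iff_isIn]
    simp only [List.mem_flatMap, List.mem_map, List.mem_range]
    constructor
    · rintro ⟨L, _, i, _, rfl⟩
      exact ⟨i, List.take_prefix _ _⟩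
    · rintro ⟨j, hpre⟩
      have hlen := hpre.length_le
      rw [List.length_drop] at hlen
      have hpos : 0 < k.length := List.length_pos_iff.mpr hne
      refine ⟨k.length, hL, j, by omega, ?_⟩
      exact (List.prefix_iff_eq_take.mp hpre).symm
  cases h : PySem.Chars.isIn k cs with
  | true => exact List.contains_iff_mem.mpr (this.mpr h)
  | false =>
      apply Bool.eq_false_iff.mpr
      intro hc
      rw [h] at this
      exact absurd (this.mp (List.contains_iff_mem.mp hc)) (by simp)

-- membership of a keyword in the precomputed found set is exactly the substring test
theorem pv_found_contains (cs : List Char) (k : List Char) (hk : k ∈ pvKeywords)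
    (hne : k ≠ []) (hL : k.length ∈ pvLens) :
    (pvFound cs).contains k = PySem.Chars.isIn k cs := by
  rw [← pv_window_isIn cs k hne hL]
  cases h : (pvWindows cs).contains k with
  | true =>
      exact List.contains_iff_mem.mpr (List.mem_filter.mpr ⟨hk, h⟩)
  | false =>
      apply Bool.eq_false_iff.mpr
      intro hc
      have := (List.mem_filter.mp (List.contains_iff_mem.mp hc)).2
      rw [h] at this
      exact Bool.false_ne_true this

-- push Option.getD through one if-step of the first-match scan
theorem pvGetD_ite (c : Prop) [Decidable c] (a : String) (r : Option String) (d : String) :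
    (if c then some a else r).getD d = if c then a else r.getD d := by
  split <;> rfl

-- ===== VERDICT =====
set_option maxHeartbeats 1600000 in
theorem map_custom_field_to_webhook_spec : Claim_equal_map_custom_field_to_webhook := by
  intro field_name field_key _
  unfold Spec_map_custom_field_to_webhook map_custom_field_to_webhook map_custom_field_to_webhook_alt
  set cs := (PySem.Str.lower (PySem.Str.join " " [field_name, field_key])).toList with hcs
  have h0 : (pvFound cs).contains "birth".toList = PySem.Chars.isIn "birth".toList cs := pv_found_contains cs _ (by decide) (by decide) (by decide)
  have h1 : (pvFound cs).contains "dob".toList = PySem.Chars.isIn "dob".toList cs := pv_found_contains cs _ (by decide) (by decide) (by decide)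
  have h2 : (pvFound cs).contains "date_of_birth".toList = PySem.Chars.isIn "date_of_birth".toList cs := pv_found_contains cs _ (by decide) (by decide) (by decide)
  have h3 : (pvFound cs).contains "birth_state".toList = PySem.Chars.isIn "birth_state".toList cs := pv_found_contains cs _ (by decide) (by decide) (by decide)
  have h4 : (pvFound cs).contains "state_of_birth".toList = PySem.Chars.isIn "state_of_birth".toList cs := pv_found_contains cs _ (by decide) (by decide) (by decide)
  have h5 : (pvFound cs).contains "age".toList = PySem.Chars.isIn "age".toList cs := pv_found_contains cs _ (by decide) (by decide) (by decide)
  have h6 : (pvFound cs).contains "coverage".toList = PySem.Chars.isIn "coverage".toList cs := pv_found_contains cs _ (by decide) (by decide) (by decide)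
  have h7 : (pvFound cs).contains "ssn".toList = PySem.Chars.isIn "ssn".toList cs := pv_found_contains cs _ (by decide) (by decide) (by decide)
  have h8 : (pvFound cs).contains "social_security".toList = PySem.Chars.isIn "social_security".toList cs := pv_found_contains cs _ (by decide) (by decide) (by decide)
  have h9 : (pvFound cs).contains "social security".toList = PySem.Chars.isIn "social security".toList cs := pv_found_contains cs _ (by decide) (by decide) (by decide)
  have h10 : (pvFound cs).contains "height".toList = PySem.Chars.isIn "height".toList cs := pv_found_contains cs _ (by decide) (by decide) (by decide)
  have h11 : (pvFound cs).contains "weight".toList = PySem.Chars.isIn "weight".toList cs := pv_found_contains cs _ (by decide) (by decide) (by decide)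
  have h12 : (pvFound cs).contains "doctor".toList = PySem.Chars.isIn "doctor".toList cs := pv_found_contains cs _ (by decide) (by decide) (by decide)
  have h13 : (pvFound cs).contains "physician".toList = PySem.Chars.isIn "physician".toList cs := pv_found_contains cs _ (by decide) (by decide) (by decide)
  have h14 : (pvFound cs).contains "tobacco".toList = PySem.Chars.isIn "tobacco".toList cs := pv_found_contains cs _ (by decide) (by decide) (by decide)
  have h15 : (pvFound cs).contains "smoke".toList = PySem.Chars.isIn "smoke".toList cs := pv_found_contains cs _ (by decide) (by decide) (by decide)
  have h16 : (pvFound cs).contains "smoking".toList = PySem.Chars.isIn "smoking".toList cs := pv_found_contains cs _ (by decide) (by decide) (by decide)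
  have h17 : (pvFound cs).contains "health".toList = PySem.Chars.isIn "health".toList cs := pv_found_contains cs _ (by decide) (by decide) (by decide)
  have h18 : (pvFound cs).contains "condition".toList = PySem.Chars.isIn "condition".toList cs := pv_found_contains cs _ (by decide) (by decide) (by decide)
  have h19 : (pvFound cs).contains "medical".toList = PySem.Chars.isIn "medical".toList cs := pv_found_contains cs _ (by decide) (by decide) (by decide)
  have h20 : (pvFound cs).contains "medication".toList = PySem.Chars.isIn "medication".toList cs := pv_found_contains cs _ (by decide) (by decide) (by decide)
  have h21 : (pvFound cs).contains "medicine".toList = PySem.Chars.isIn "medicine".toList cs := pv_found_contains cs _ (by decide) (by decide) (by decide)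
  have h22 : (pvFound cs).contains "drug".toList = PySem.Chars.isIn "drug".toList cs := pv_found_contains cs _ (by decide) (by decide) (by decide)
  have h23 : (pvFound cs).contains "premium".toList = PySem.Chars.isIn "premium".toList cs := pv_found_contains cs _ (by decide) (by decide) (by decide)
  have h24 : (pvFound cs).contains "monthly_premium".toList = PySem.Chars.isIn "monthly_premium".toList cs := pv_found_contains cs _ (by decide) (by decide) (by decide)
  have h25 : (pvFound cs).contains "face_amount".toList = PySem.Chars.isIn "face_amount".toList cs := pv_found_contains cs _ (by decide) (by decide) (by decide)
  have h26 : (pvFound cs).contains "face amount".toList = PySem.Chars.isIn "face amount".toList cs := pv_found_contains cs _ (by decide) (by decide) (by decide)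
  have h27 : (pvFound cs).contains "carrier".toList = PySem.Chars.isIn "carrier".toList cs := pv_found_contains cs _ (by decide) (by decide) (by decide)
  have h28 : (pvFound cs).contains "insurance".toList = PySem.Chars.isIn "insurance".toList cs := pv_found_contains cs _ (by decide) (by decide) (by decide)
  have h29 : (pvFound cs).contains "draft_date".toList = PySem.Chars.isIn "draft_date".toList cs := pv_found_contains cs _ (by decide) (by decide) (by decide)
  have h30 : (pvFound cs).contains "draft date".toList = PySem.Chars.isIn "draft date".toList cs := pv_found_contains cs _ (by decide) (by decide) (by decide)
  have h31 : (pvFound cs).contains "beneficiary".toList = PySem.Chars.isIn "beneficiary".toList cs := pv_found_contains cs _ (by decide) (by decide) (by decide)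
  have h32 : (pvFound cs).contains "beneficiaries".toList = PySem.Chars.isIn "beneficiaries".toList cs := pv_found_contains cs _ (by decide) (by decide) (by decide)
  have h33 : (pvFound cs).contains "bank".toList = PySem.Chars.isIn "bank".toList cs := pv_found_contains cs _ (by decide) (by decide) (by decide)
  have h34 : (pvFound cs).contains "name".toList = PySem.Chars.isIn "name".toList cs := pv_found_contains cs _ (by decide) (by decide) (by decide)
  have h35 : (pvFound cs).contains "routing".toList = PySem.Chars.isIn "routing".toList cs := pv_found_contains cs _ (by decide) (by decide) (by decide)
  have h36 : (pvFound cs).contains "aba".toList = PySem.Chars.isIn "aba".toList cs := pv_found_contains cs _ (by decide) (by decide) (by decide)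
  have h37 : (pvFound cs).contains "account".toList = PySem.Chars.isIn "account".toList cs := pv_found_contains cs _ (by decide) (by decide) (by decide)
  have h38 : (pvFound cs).contains "number".toList = PySem.Chars.isIn "number".toList cs := pv_found_contains cs _ (by decide) (by decide) (by decide)
  have h39 : (pvFound cs).contains "future_draft".toList = PySem.Chars.isIn "future_draft".toList cs := pv_found_contains cs _ (by decide) (by decide) (by decide)
  have h40 : (pvFound cs).contains "next_draft".toList = PySem.Chars.isIn "next_draft".toList cs := pv_found_contains cs _ (by decide) (by decide) (by decide)
  have h41 : (pvFound cs).contains "driver".toList = PySem.Chars.isIn "driver".toList cs := pv_found_contains cs _ (by decide) (by decide) (by decide)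
  have h42 : (pvFound cs).contains "license".toList = PySem.Chars.isIn "license".toList cs := pv_found_contains cs _ (by decide) (by decide) (by decide)
  have h43 : (pvFound cs).contains "dl".toList = PySem.Chars.isIn "dl".toList cs := pv_found_contains cs _ (by decide) (by decide) (by decide)
  have h44 : (pvFound cs).contains "existing_coverage".toList = PySem.Chars.isIn "existing_coverage".toList cs := pv_found_contains cs _ (by decide) (by decide) (by decide)
  have h45 : (pvFound cs).contains "previous_coverage".toList = PySem.Chars.isIn "previous_coverage".toList cs := pv_found_contains cs _ (by decide) (by decide) (by decide)
  have h46 : (pvFound cs).contains "previous_application".toList = PySem.Chars.isIn "previous_application".toList cs := pv_found_contains cs _ (by decide) (by decide) (by decide)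
  have h47 : (pvFound cs).contains "prior_application".toList = PySem.Chars.isIn "prior_application".toList cs := pv_found_contains cs _ (by decide) (by decide) (by decide)
  have h48 : (pvFound cs).contains "submission".toList = PySem.Chars.isIn "submission".toList cs := pv_found_contains cs _ (by decide) (by decide) (by decide)
  have h49 : (pvFound cs).contains "submit".toList = PySem.Chars.isIn "submit".toList cs := pv_found_contains cs _ (by decide) (by decide) (by decide)
  have h50 : (pvFound cs).contains "additional".toList = PySem.Chars.isIn "additional".toList cs := pv_found_contains cs _ (by decide) (by decide) (by decide)
  have h51 : (pvFound cs).contains "notes".toList = PySem.Chars.isIn "notes".toList cs := pv_found_contains cs _ (by decide) (by decide) (by decide)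
  have h52 : (pvFound cs).contains "comments".toList = PySem.Chars.isIn "comments".toList cs := pv_found_contains cs _ (by decide) (by decide) (by decide)
  have h53 : (pvFound cs).contains "address".toList = PySem.Chars.isIn "address".toList cs := pv_found_contains cs _ (by decide) (by decide) (by decide)
  have h54 : (pvFound cs).contains "street".toList = PySem.Chars.isIn "street".toList cs := pv_found_contains cs _ (by decide) (by decide) (by decide)
  have h55 : (pvFound cs).contains "city".toList = PySem.Chars.isIn "city".toList cs := pv_found_contains cs _ (by decide) (by decide) (by decide)
  have h56 : (pvFound cs).contains "state".toList = PySem.Chars.isIn "state".toList cs := pv_found_contains cs _ (by decide) (by decide) (by decide)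
  have h57 : (pvFound cs).contains "zip".toList = PySem.Chars.isIn "zip".toList cs := pv_found_contains cs _ (by decide) (by decide) (by decide)
  have h58 : (pvFound cs).contains "postal".toList = PySem.Chars.isIn "postal".toList cs := pv_found_contains cs _ (by decide) (by decide) (by decide)
  simp only [pvSpec, pvScan, List.any_cons, List.any_nil, List.all_cons, List.all_nil,
    h0, h1, h2, h3, h4, h5, h6, h7, h8, h9, h10, h11, h12, h13, h14, h15, h16, h17, h18, h19, h20, h21, h22, h23, h24, h25, h26, h27, h28, h29, h30, h31, h32, h33, h34, h35, h36, h37, h38, h39, h40, h41, h42, h43, h44, h45, h46, h47, h48, h49, h50, h51, h52, h53, h54, h55, h56, h57, h58,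
    Bool.or_false, Bool.and_true, Bool.not_false, Bool.or_assoc, pvGetD_ite, Option.getD_none,
    PySem.Str.isIn_eq, ← hcs]
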